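-- pv_equiv track=rewrite | github.com/upunaprosk/corpora-manipulation | parallel_error_corpora.py | apply_patch_to_text
-- ===== SOURCE A (Python) =====
-- import operator
--
-- def _rectify_patch(patch_list):
--     """
--     Sorts patch list and deals with overlapping patches (leaves only outer nested patch, also leaves the longest patch
--     in case of otherwise overlapping patches, with the latest one being left in case of matching length).
--     It also removes the patches in which the starting index is longer than the finishing.
--
--     :param patch_list: list containing patches in [start, end, correction] notation
--     :return: rectified patch list
--     """
--     patch_list.sort(key=operator.itemgetter(1))
--     for i in reversed(range(len(patch_list) - 1)):
--         start, end = patch_list[i][:2]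
--         corr = patch_list[i][-1]
--         for j in range(i + 1, len(patch_list)):
--             lstart, lend = patch_list[j][:2]
--             lcorr = patch_list[j][-1]
--             if lstart > lend:
--                 del patch_list[j]
--                 break
--             if (start > lstart and end <= lend) or (start >= lstart and end < lend):
--                 del patch_list[i]
--                 break
--             if (start == lstart and end == lend) or end > lstart:
--                 if len(corr) > len(lcorr):
--                     del patch_list[j]
--                 else:
--                     del patch_list[i]
--                 break
--     return patch_list
--
-- def apply_patch_to_text(text, patch_list):
--     """
--     Applies correction to an individual text entry
--
--     :param text: string containing original uncorrected text
--     :param patch_list: list containing patches in [start, end, correction] notation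
--     :return: original text (str), corrected text (str), number of corrections (int)
--     """
--     l = len(text)
--     patch_list = _rectify_patch(patch_list)
--     corrections = len(patch_list)
--     text_d = {i: c for i, c in enumerate(text)}
--
--     for patch in patch_list:
--         start, end = patch[:2]
--         correction = patch[-1]
--         if start == end:
--             if start == l:
--                 text_d[start] = correction
--             else:
--                 text_d[start] = correction + text_d[start]
--         else:
--             for i in range(start, end):
--                 text_d[i] = ""
--             text_d[start] = correction
--
--     corr_text = "".join([text_d[i] for i in range(len(text))])
--
--     return text, corr_text, corrections
-- ===== SOURCE B (Python) =====
-- import operator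
--
-- def _rectify_patch(patch_list):
--     patch_list.sort(key=operator.itemgetter(1))
--     for i in reversed(range(len(patch_list) - 1)):
--         start, end = patch_list[i][:2]
--         corr = patch_list[i][-1]
--         for j in range(i + 1, len(patch_list)):
--             lstart, lend = patch_list[j][:2]
--             lcorr = patch_list[j][-1]
--             if lstart > lend:
--                 del patch_list[j]
--                 break
--             if (start > lstart and end <= lend) or (start >= lstart and end < lend):
--                 del patch_list[i]
--                 break
--             if (start == lstart and end == lend) or end > lstart:
--                 if len(corr) > len(lcorr):
--                     del patch_list[j]
--                 else:
--                     del patch_list[i]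
--                 break
--     return patch_list
--
-- def apply_patch_to_text(text, patch_list):
--     """Index-major: for every text position fold the patches over that position."""
--     patch_list = _rectify_patch(patch_list)
--     pieces = []
--     for i in range(len(text)):
--         piece = text[i]
--         for patch in patch_list:
--             start, end = patch[:2]
--             correction = patch[-1]
--             if start == end:
--                 if start == i:
--                     piece = correction + piece
--             else:
--                 if start <= i < end:
--                     piece = ""
--                 if start == i:
--                     piece = correction
--         pieces.append(piece)
--     return text, "".join(pieces), len(patch_list)
-- ===== Notes on version B (the rewrite author's own statement) =====
-- stated objective: alternative
-- what changed: Rectification is kept identical; the application phase is rewritten index-major: instead of building a per-index dict, mutating it patch by patch and re-joining, B computes each output character independently by folding every patch over that one position (interval test + start test), then concatenates.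
-- outside the precondition, e.g. on apply_patch_to_text('ab', [(5, 5, 'X'), (0, 9, 'Y')]): A returns ('ab', 'Y', 1), B returns ('ab', 'Y', 1)
import Mathlib
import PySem

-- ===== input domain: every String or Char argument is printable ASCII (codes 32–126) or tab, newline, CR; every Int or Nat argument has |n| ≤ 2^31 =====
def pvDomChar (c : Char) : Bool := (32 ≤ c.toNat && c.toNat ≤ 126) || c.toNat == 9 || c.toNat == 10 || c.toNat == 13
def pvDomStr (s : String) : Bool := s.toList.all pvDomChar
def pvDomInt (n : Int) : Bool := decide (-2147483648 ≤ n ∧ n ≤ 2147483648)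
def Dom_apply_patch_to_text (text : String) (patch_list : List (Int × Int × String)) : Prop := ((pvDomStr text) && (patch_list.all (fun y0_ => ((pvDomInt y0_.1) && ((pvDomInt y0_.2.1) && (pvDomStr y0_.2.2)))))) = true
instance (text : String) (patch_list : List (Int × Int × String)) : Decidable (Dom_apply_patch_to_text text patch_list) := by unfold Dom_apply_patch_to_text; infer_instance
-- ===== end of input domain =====

-- B keeps the rectification helper identical and rewrites only the application phase,
-- index-major: each output character is computed by folding every patch over that one
-- position, instead of mutating a shared per-index dict (objective: alternative).
-- Both Pythons sort/delete inside the argument list in place; the equivalence here is about the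
-- return value only (the mutation is the same in both).

-- ===== PORT A =====
-- _rectify_patch, shared verbatim by A and B (Source B keeps the helper identical).
-- inner loop: 'for j in range(i+1, len(patch_list))' with the three delete-and-break branches.
def pvRectifyInner (s e : Int) (c : String) (pl : List (Int × Int × String)) (i j : Nat) :
    List (Int × Int × String) :=
  if h : j < pl.length then
    let q := pl[j]
    if q.1 > q.2.1 then pl.eraseIdx j
    else if (s > q.1 ∧ e ≤ q.2.1) ∨ (s ≥ q.1 ∧ e < q.2.1) then pl.eraseIdx i
    else if (s = q.1 ∧ e = q.2.1) ∨ e > q.1 then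
      if PySem.Str.len c > PySem.Str.len q.2.2 then pl.eraseIdx j else pl.eraseIdx i
    else pvRectifyInner s e c pl i (j + 1)
  else pl
termination_by pl.length - j

-- one outer iteration at index i (reads patch_list[i] into start, end, corr, then scans j)
def pvRectifyStep (pl : List (Int × Int × String)) (i : Nat) : List (Int × Int × String) :=
  let p := pl.getD i (0, 0, "")
  pvRectifyInner p.1 p.2.1 p.2.2 pl i (i + 1)

-- 'for i in reversed(range(len(patch_list) - 1))': i = k-1, k-2, …, 0
def pvRectifyOuter : List (Int × Int × String) → Nat → List (Int × Int × String)
  | pl, 0 => pl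
  | pl, (i + 1) => pvRectifyOuter (pvRectifyStep pl i) i

def pvRectify (pl : List (Int × Int × String)) : List (Int × Int × String) :=
  let s := PySem.List.sorted pl (fun p => p.2.1) false
  pvRectifyOuter s (s.length - 1)

-- text_d is only ever written by key and read back by key (never iterated, never compared as a
-- whole), so it is ported as a hash map: PySem.Dict's list-backed insert would make the
-- 'for i in range(start, end)' blanking loop quadratic and unevaluable on large ranges, while
-- Std.HashMap performs exactly Python's dict stores and lookups (and at dict speed).
-- One patch applied to the position map (values are the strings as List Char;
-- "".join of the values is List.flatten).  A's text_d[start] read raises KeyError when the key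
-- is absent — those inputs are excluded by Pre_ below; the port reads the map's default [].
def pvApplyOne (l : Int) (d : Std.HashMap Int (List Char)) (p : Int × Int × String) :
    Std.HashMap Int (List Char) :=
  if p.1 = p.2.1 then
    if p.1 = l then d.insert p.1 p.2.2.toList
    else d.insert p.1 (p.2.2.toList ++ d.getD p.1 [])
  else
    ((PySem.List.pyRange p.1 p.2.1 1).foldl
      (fun d i => d.insert i ([] : List Char)) d).insert p.1 p.2.2.toList

def apply_patch_to_text (text : String) (patch_list : List (Int × Int × String)) :
    String × String × Int :=
  let tl := text.toList
  let l : Int := (tl.length : Int)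
  let pl := pvRectify patch_list
  let corrections : Int := (pl.length : Int)
  let d0 : Std.HashMap Int (List Char) :=
    (PySem.List.enumerate tl 0).foldl (fun d ic => d.insert ic.1 [ic.2]) ∅
  let d := pl.foldl (pvApplyOne l) d0
  let corr := ((PySem.List.pyRange 0 l 1).map (fun i => d.getD i [])).flatten
  (text, String.ofList corr, corrections)

-- ===== PORT B =====
-- the inner loop body of Source B: one patch folded over the piece held at position i
def pvPieceStep (i : Int) (piece : List Char) (p : Int × Int × String) : List Char :=
  if p.1 = p.2.1 then
    if p.1 = i then p.2.2.toList ++ piece else piece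
  else
    let piece' := if p.1 ≤ i ∧ i < p.2.1 then ([] : List Char) else piece
    if p.1 = i then p.2.2.toList else piece'

def apply_patch_to_text_alt (text : String) (patch_list : List (Int × Int × String)) :
    String × String × Int :=
  let tl := text.toList
  let pl := pvRectify patch_list
  -- 'for i in range(len(text)): piece = text[i]; for patch in patch_list: …; pieces.append(piece)'
  let pieces := (PySem.List.pyRange 0 (tl.length : Int) 1).map
    (fun i => pl.foldl (pvPieceStep i) ((PySem.List.pyGet? tl i).elim [] (fun ch => [ch])))
  (text, String.ofList pieces.flatten, (pl.length : Int))

-- ===== PRECONDITION & SPEC =====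
-- Pre_ excludes exactly the inputs holding an insertion patch (start == end) whose position is
-- outside [0, len(text)]: there A's text_d[start] read raises KeyError whenever such a patch
-- survives rectification (when the rectifier happens to drop it, A returns and agrees with B,
-- so the exclusion is slightly conservative).
def Pre_apply_patch_to_text (text : String) (patch_list : List (Int × Int × String)) : Prop :=
  ∀ p ∈ patch_list, p.1 = p.2.1 → 0 ≤ p.1 ∧ p.1 ≤ (text.toList.length : Int)
instance (text : String) (patch_list : List (Int × Int × String)) : Decidable (Pre_apply_patch_to_text text patch_list) := by unfold Pre_apply_patch_to_text; infer_instance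

def pvWitness_apply_patch_to_text : String × (List (Int × Int × String)) :=
  ("ab", [(0, 1, "X"), (2, 2, "!")])

def Spec_apply_patch_to_text (text : String) (patch_list : List (Int × Int × String)) (out : String × String × Int) : Prop := out = apply_patch_to_text_alt text patch_list
instance (text : String) (patch_list : List (Int × Int × String)) (out : String × String × Int) : Decidable (Spec_apply_patch_to_text text patch_list out) := by unfold Spec_apply_patch_to_text; infer_instance

-- ===== CLAIM (what is proved, stated in full; the proofs are below) =====
def Claim_equal_apply_patch_to_text : Prop := ∀ (text : String) (patch_list : List (Int × Int × String)), Dom_apply_patch_to_text text patch_list → Pre_apply_patch_to_text text patch_list → Spec_apply_patch_to_text text patch_list (apply_patch_to_text text patch_list)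

-- ===== LEMMAS AND PROOFS =====

theorem pvGetDIns (d : Std.HashMap Int (List Char)) (k : Int) (v : List Char) (j : Int) :
    (d.insert k v).getD j [] = if j = k then v else d.getD j [] := by
  rw [Std.HashMap.getD_insert]
  by_cases h : j = k
  · rw [if_pos h, if_pos (by simp [h])]
  · rw [if_neg h, if_neg (by simp; omega)]

theorem pvFoldIns_not_mem (rng : List Int) (k : Int) :
    ∀ (d : Std.HashMap Int (List Char)), k ∉ rng →
    ((rng.foldl (fun d i => d.insert i ([] : List Char)) d)).getD k [] = d.getD k [] := by
  induction rng with
  | nil => intro d _; rfl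
  | cons a t ih =>
    intro d h
    simp only [List.foldl_cons]
    rw [ih _ (fun hm => h (List.mem_cons_of_mem a hm)), pvGetDIns]
    exact if_neg (fun he : k = a => h (he ▸ List.mem_cons_self))

theorem pvFoldIns_mem (rng : List Int) (k : Int) :
    ∀ (d : Std.HashMap Int (List Char)), k ∈ rng →
    ((rng.foldl (fun d i => d.insert i ([] : List Char)) d)).getD k [] = [] := by
  induction rng with
  | nil => intro d h; simp at h
  | cons a t ih =>
    intro d h
    simp only [List.foldl_cons]
    by_cases ht : k ∈ t
    · exact ih _ ht
    · have hk : k = a := by rcases List.mem_cons.mp h with h | h; exact h; exact absurd h ht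
      rw [pvFoldIns_not_mem t k _ ht, hk, pvGetDIns]
      exact if_pos rfl

theorem pvD0 (ts : List Char) : ∀ (s : Nat) (d : Std.HashMap Int (List Char)) (k : Nat),
    ((PySem.List.enumerate ts (s : Int)).foldl (fun d ic => d.insert ic.1 [ic.2]) d).getD (k : Int) []
      = if s ≤ k ∧ k < s + ts.length then (ts.drop (k - s)).take 1 else d.getD (k : Int) [] := by
  induction ts with
  | nil =>
    intro s d k
    simp [PySem.List.enumerate]
  | cons c ts ih =>
    intro s d k
    rw [PySem.List.enumerate_cons]
    simp only [List.foldl_cons]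
    have hc : ((s : Int) + 1) = ((s + 1 : Nat) : Int) := by push_cast; ring
    rw [hc, ih (s+1)]
    by_cases h1 : s + 1 ≤ k ∧ k < s + 1 + ts.length
    · rw [if_pos h1, if_pos (by simp only [List.length_cons]; omega)]
      rw [show k - s = (k - (s+1)) + 1 by omega, List.drop_succ_cons]
    · rw [if_neg h1]
      by_cases h2 : k = s
      · subst h2
        rw [if_pos (by simp only [List.length_cons]; omega), pvGetDIns, if_pos rfl]
        simp
      · rw [if_neg (by simp only [List.length_cons]; omega), pvGetDIns]
        exact if_neg (by intro he; exact h2 (by exact_mod_cast he))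

theorem pvMapCongr (a b : Int) (f g : Int → List Char)
    (h : ∀ k, a ≤ k → k < b → f k = g k) :
    (PySem.List.pyRange a b 1).map f = (PySem.List.pyRange a b 1).map g :=
  List.map_congr_left fun k hk =>
    h k (PySem.List.mem_pyRange_one.mp hk).1 (PySem.List.mem_pyRange_one.mp hk).2

theorem pvCharPiece (tl : List Char) (k : Nat) (h : k < tl.length) :
    ((PySem.List.pyGet? tl (k : Int)).elim [] (fun ch => [ch])) = (tl.drop k).take 1 := by
  rw [PySem.List.pyGet?_natCast, List.getElem?_eq_getElem h,
    show List.drop k tl = tl[k] :: List.drop (k+1) tl from List.drop_eq_getElem_cons h]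
  rfl

-- one patch applied to the map, read back at an in-range position i, is B's per-position step
theorem pvStepEq (l : Int) (d : Std.HashMap Int (List Char)) (p : Int × Int × String)
    (i : Int) (hl : i < l) :
    (pvApplyOne l d p).getD i [] = pvPieceStep i (d.getD i []) p := by
  rw [pvApplyOne, pvPieceStep]
  by_cases hins : p.1 = p.2.1
  · rw [if_pos hins, if_pos hins]
    by_cases hpl : p.1 = l
    · rw [if_pos hpl, pvGetDIns]
      rw [if_neg (by omega), if_neg (show ¬ p.1 = i by omega)]
    · rw [if_neg hpl, pvGetDIns]
      by_cases hi : p.1 = i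
      · rw [if_pos hi, if_pos hi.symm, hi]
      · rw [if_neg hi, if_neg (fun h => hi h.symm)]
  · rw [if_neg hins, if_neg hins, pvGetDIns]
    by_cases hi : p.1 = i
    · rw [if_pos hi, if_pos hi.symm]
    · rw [if_neg hi, if_neg (fun h => hi h.symm)]
      by_cases hmem : p.1 ≤ i ∧ i < p.2.1
      · rw [if_pos hmem,
          pvFoldIns_mem _ _ _ (PySem.List.mem_pyRange_one.mpr hmem)]
      · rw [if_neg hmem,
          pvFoldIns_not_mem _ _ _ (fun hm => hmem (PySem.List.mem_pyRange_one.mp hm))]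

theorem pvFoldEq (l : Int) : ∀ (pl : List (Int × Int × String))
    (d : Std.HashMap Int (List Char)) (i : Int), i < l →
    (pl.foldl (pvApplyOne l) d).getD i [] = pl.foldl (pvPieceStep i) (d.getD i []) := by
  intro pl
  induction pl with
  | nil => intro d i _; rfl
  | cons p t ih =>
    intro d i hl
    simp only [List.foldl_cons]
    rw [ih _ i hl, pvStepEq l d p i hl]

theorem pvFinal (text : String) (patch_list : List (Int × Int × String)) :
    apply_patch_to_text text patch_list = apply_patch_to_text_alt text patch_list := by
  simp only [apply_patch_to_text, apply_patch_to_text_alt]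
  refine congrArg (fun c => (text, String.ofList c, ((pvRectify patch_list).length : Int))) ?_
  refine congrArg List.flatten ?_
  apply pvMapCongr
  intro i h0 hl
  rw [pvFoldEq (text.toList.length : Int) (pvRectify patch_list) _ i hl]
  have hk : i = ((i.toNat : Nat) : Int) := by omega
  have h0' : ((0 : Nat) : Int) = (0 : Int) := by norm_num
  have hd0 := pvD0 text.toList 0 ∅ i.toNat
  rw [h0'] at hd0
  rw [hk, hd0, if_pos ⟨Nat.zero_le _, by omega⟩, pvCharPiece text.toList i.toNat (by omega)]
  norm_num

-- ===== VERDICT (by name: the statement is the Claim_ definition above) =====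
theorem apply_patch_to_text_spec : Claim_equal_apply_patch_to_text := by
  intro text patch_list _ _
  unfold Spec_apply_patch_to_text
  exact pvFinal text patch_list
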